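-- pv_equiv track=rewrite | github.com/Shivam5560/Professional_Grade_RAG | backend/app/core/pageindex_utils.py | _build_page_groups
-- ===== SOURCE A (Python) =====
-- from typing import List, Tuple, Dict, Any, Optional
--
-- def _build_page_groups(
--     pages: List[Tuple[str, int]],
--     max_pages_per_chunk: int,
--     max_tokens_per_group: int = 20000,
-- ) -> List[Tuple[int, int]]:
--     """
--     Split pages into groups for TOC generation, respecting both page count
--     and token budget (mirrors PageIndex's `page_list_to_group_text`).
--
--     Returns list of (start_page, end_page) tuples (1-indexed, inclusive).
--     """
--     total_pages = len(pages)
--     if total_pages == 0: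
--         return []
--
--     groups: List[Tuple[int, int]] = []
--     group_start = 0
--     group_tokens = 0
--
--     for i, (_, tok) in enumerate(pages):
--         if (
--             group_tokens + tok > max_tokens_per_group
--             or (i - group_start) >= max_pages_per_chunk
--         ) and i > group_start:
--             # Close current group
--             groups.append((group_start + 1, i))  # 1-indexed, inclusive
--             group_start = max(i - 1, group_start)  # 1-page overlap
--             group_tokens = pages[max(i - 1, 0)][1] + tok
--         else:
--             group_tokens += tok
--
--     # Add the final group
--     if group_start < total_pages:
--         groups.append((group_start + 1, total_pages))
--
--     return groups
-- ===== SOURCE B (Python) =====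
-- def _build_page_groups(pages, max_pages_per_chunk, max_tokens_per_group=20000):
--     """Prefix-sum / break-point version: precompute a prefix-sum table of the
--     token counts, then chain break points; each group's token budget test is a
--     prefix-sum difference against the group's start, so no running token
--     accumulator (and no carried-over token seed) is maintained at all."""
--     n = len(pages)
--     if n == 0:
--         return []
--     pref = [0] * (n + 1)
--     for k, (_, t) in enumerate(pages):
--         pref[k + 1] = pref[k] + t
--     groups = []
--     s, lo = 0, 1          # group start, first candidate break point
--     while True:
--         i = lo
--         while i < n and not (pref[i + 1] - pref[s] > max_tokens_per_group
--                              or i - s >= max_pages_per_chunk):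
--             i += 1
--         if i >= n:
--             groups.append((s + 1, n))
--             return groups
--         groups.append((s + 1, i))
--         s, lo = i - 1, i + 1   # 1-page overlap; never re-test the break index
-- ===== Notes on version B (the rewrite author's own statement) =====
-- stated objective: alternative
-- what changed: B precomputes a prefix-sum table of token counts and chains break points: each group's budget test is a prefix-sum difference against the group's start index, so A's running token accumulator and its carried-over token seed disappear entirely.
import Mathlib
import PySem

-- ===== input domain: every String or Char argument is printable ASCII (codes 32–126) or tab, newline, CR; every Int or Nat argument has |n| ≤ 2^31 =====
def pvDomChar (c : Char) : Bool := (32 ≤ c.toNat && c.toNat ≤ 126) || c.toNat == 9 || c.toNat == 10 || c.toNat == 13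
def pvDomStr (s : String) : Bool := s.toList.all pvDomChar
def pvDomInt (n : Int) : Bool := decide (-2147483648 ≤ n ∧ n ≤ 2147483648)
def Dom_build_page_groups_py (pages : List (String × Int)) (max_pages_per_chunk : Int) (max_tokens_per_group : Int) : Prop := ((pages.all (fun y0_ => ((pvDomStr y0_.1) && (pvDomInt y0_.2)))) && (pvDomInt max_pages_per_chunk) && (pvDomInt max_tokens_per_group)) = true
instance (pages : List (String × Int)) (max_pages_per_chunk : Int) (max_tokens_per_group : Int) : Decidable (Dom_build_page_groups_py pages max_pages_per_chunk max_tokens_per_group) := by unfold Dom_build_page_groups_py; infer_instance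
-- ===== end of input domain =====

-- B replaces A's running token accumulator by a precomputed prefix-sum table and a
-- break-point chain (objective: alternative, same cost); both are total.

-- ===== PORT A =====
-- token of pages[i]; every access in A is in range (0 ≤ index < pages.length), so getD is exact
def pvTokA (pages : List (String × Int)) (i : Nat) : Int := (pages.getD i ("", 0)).2

-- the `for i, (_, tok) in enumerate(pages)` loop of A, state (group_start, group_tokens, groups),
-- followed by A's trailing `if group_start < total_pages` append
def pvA_loop (pages : List (String × Int)) (mp mt : Int) (i gs : Nat) (gt : Int)
    (acc : List (Int × Int)) : List (Int × Int) :=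
  if _h : i < pages.length then
    let tok := pvTokA pages i
    if (gt + tok > mt ∨ (i : Int) - (gs : Int) ≥ mp) ∧ gs < i then
      pvA_loop pages mp mt (i + 1) (max (i - 1) gs) (pvTokA pages (max (i - 1) 0) + tok)
        (acc ++ [((gs : Int) + 1, (i : Int))])
    else
      pvA_loop pages mp mt (i + 1) gs (gt + tok) acc
  else
    if (gs : Int) < (pages.length : Int) then acc ++ [((gs : Int) + 1, (pages.length : Int))]
    else acc
termination_by pages.length - i

def build_page_groups_py (pages : List (String × Int)) (max_pages_per_chunk : Int) (max_tokens_per_group : Int) : List (Int × Int) :=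
  if pages.length = 0 then [] else
    pvA_loop pages max_pages_per_chunk max_tokens_per_group 0 0 0 []

-- ===== PORT B =====
-- Source B's `pref` table: pref[k] = sum of the first k token counts (built by one pass)
def pvPrefFrom (pages : List (String × Int)) (acc : Int) : List Int :=
  match pages with
  | [] => [acc]
  | p :: rest => acc :: pvPrefFrom rest (acc + p.2)

-- pref[i]; every access in Source B is in range (0 ≤ i ≤ n), so getD is exact
def pvPrefAt (pages : List (String × Int)) (i : Nat) : Int :=
  (pvPrefFrom pages 0).getD i 0

-- Source B's inner `while` scan: first break point i ≥ lo for the group starting at s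
-- (returns n when the end of pages is reached)
def pvB_scan (pages : List (String × Int)) (mp mt : Int) (s i : Nat) : Nat :=
  if _h : i < pages.length then
    if pvPrefAt pages (i + 1) - pvPrefAt pages s > mt ∨ (i : Int) - (s : Int) ≥ mp then i
    else pvB_scan pages mp mt s (i + 1)
  else pages.length
termination_by pages.length - i

-- Source B's outer `while True` loop: one group per iteration; fuel only makes the
-- recursion structural, the zero case is never reached from the entry point
def pvB_groups (pages : List (String × Int)) (mp mt : Int) :
    Nat → Nat → Nat → List (Int × Int)
  | 0, _, _ => []
  | f + 1, s, lo =>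
    let i := pvB_scan pages mp mt s lo
    if i ≥ pages.length then [((s : Int) + 1, (pages.length : Int))]
    else ((s : Int) + 1, (i : Int)) :: pvB_groups pages mp mt f (i - 1) (i + 1)

def build_page_groups_py_alt (pages : List (String × Int)) (max_pages_per_chunk : Int) (max_tokens_per_group : Int) : List (Int × Int) :=
  if pages.length = 0 then [] else
    pvB_groups pages max_pages_per_chunk max_tokens_per_group (pages.length + 1) 0 1

-- ===== PRECONDITION & SPEC =====
def Spec_build_page_groups_py (pages : List (String × Int)) (max_pages_per_chunk : Int) (max_tokens_per_group : Int) (out : List (Int × Int)) : Prop := out = build_page_groups_py_alt pages max_pages_per_chunk max_tokens_per_group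
instance (pages : List (String × Int)) (max_pages_per_chunk : Int) (max_tokens_per_group : Int) (out : List (Int × Int)) : Decidable (Spec_build_page_groups_py pages max_pages_per_chunk max_tokens_per_group out) := by unfold Spec_build_page_groups_py; infer_instance

-- ===== CLAIM =====
def Claim_equal_build_page_groups_py : Prop := ∀ (pages : List (String × Int)) (max_pages_per_chunk : Int) (max_tokens_per_group : Int), Dom_build_page_groups_py pages max_pages_per_chunk max_tokens_per_group → Spec_build_page_groups_py pages max_pages_per_chunk max_tokens_per_group (build_page_groups_py pages max_pages_per_chunk max_tokens_per_group)

-- ===== LEMMAS AND PROOFS =====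

-- the prefix table steps by one token: pref[i+1] = pref[i] + tok[i] for i < n
lemma pvPrefFrom_step (pages : List (String × Int)) :
    ∀ (i : Nat) (acc : Int), i < pages.length →
      (pvPrefFrom pages acc).getD (i + 1) 0 =
        (pvPrefFrom pages acc).getD i 0 + pvTokA pages i := by
  induction pages with
  | nil => intro i _ h; simp at h
  | cons p rest ih =>
    intro i acc h
    cases i with
    | zero => cases rest with
      | nil => simp [pvPrefFrom, pvTokA]
      | cons q r => simp [pvPrefFrom, pvTokA]
    | succ j =>
      have hj : j < rest.length := by simpa using h
      simpa [pvPrefFrom, pvTokA] using ih j (acc + p.2) hj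

lemma pvPrefAt_step (pages : List (String × Int)) (i : Nat) (h : i < pages.length) :
    pvPrefAt pages (i + 1) = pvPrefAt pages i + pvTokA pages i :=
  pvPrefFrom_step pages i 0 h

-- a non-closing page: the scan steps to i+1
lemma pvB_scan_step (pages : List (String × Int)) (mp mt : Int) (s i : Nat)
    (h : i < pages.length)
    (hc : ¬ (pvPrefAt pages (i + 1) - pvPrefAt pages s > mt ∨ (i : Int) - (s : Int) ≥ mp)) :
    pvB_scan pages mp mt s i = pvB_scan pages mp mt s (i + 1) := by
  rw [pvB_scan]; simp only [dif_pos h, if_neg hc]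

-- a closing page: the scan stops here
lemma pvB_scan_close (pages : List (String × Int)) (mp mt : Int) (s i : Nat)
    (h : i < pages.length)
    (hc : pvPrefAt pages (i + 1) - pvPrefAt pages s > mt ∨ (i : Int) - (s : Int) ≥ mp) :
    pvB_scan pages mp mt s i = i := by
  rw [pvB_scan]; simp only [dif_pos h, if_pos hc]

-- end of pages
lemma pvB_scan_none (pages : List (String × Int)) (mp mt : Int) (s i : Nat)
    (h : ¬ i < pages.length) : pvB_scan pages mp mt s i = pages.length := by
  rw [pvB_scan]; simp only [dif_neg h]

-- main invariant: from any mid-state with gs < i and gt = pref[i] - pref[gs],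
-- A's flat loop equals acc ++ B's remaining groups (B scanning from i, start gs)
lemma pvAB_key (pages : List (String × Int)) (mp mt : Int) :
    ∀ (k fuel i gs : Nat) (gt : Int) (acc : List (Int × Int)),
      pages.length - i = k → i ≤ pages.length → gs < i →
      gt = pvPrefAt pages i - pvPrefAt pages gs →
      pages.length - i < fuel →
      pvA_loop pages mp mt i gs gt acc = acc ++ pvB_groups pages mp mt fuel gs i := by
  intro k
  induction k with
  | zero =>
    intro fuel i gs gt acc hk hi hgs _ hf
    have hie : i = pages.length := by omega
    obtain ⟨f, rfl⟩ : ∃ f, fuel = f + 1 := ⟨fuel - 1, by omega⟩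
    rw [pvA_loop]
    have hnl : ¬ i < pages.length := by omega
    have hgsl : (gs : Int) < (pages.length : Int) := by exact_mod_cast (by omega : gs < pages.length)
    rw [dif_neg hnl, if_pos hgsl, pvB_groups, pvB_scan_none pages mp mt gs i hnl]
    simp
  | succ m ih =>
    intro fuel i gs gt acc hk hi hgs hgt hf
    have hil : i < pages.length := by omega
    obtain ⟨f, rfl⟩ : ∃ f, fuel = f + 1 := ⟨fuel - 1, by omega⟩
    rw [pvA_loop, dif_pos hil]
    have htokeq : gt + pvTokA pages i = pvPrefAt pages (i + 1) - pvPrefAt pages gs := by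
      rw [pvPrefAt_step pages i hil, hgt]; ring
    by_cases hc : pvPrefAt pages (i + 1) - pvPrefAt pages gs > mt ∨ (i : Int) - (gs : Int) ≥ mp
    · -- the group closes at i
      have hcA : (gt + pvTokA pages i > mt ∨ (i : Int) - (gs : Int) ≥ mp) ∧ gs < i := by
        constructor
        · rcases hc with h1 | h2
          · left; omega
          · right; exact h2
        · exact hgs
      rw [if_pos hcA]
      have hmaxg : max (i - 1) gs = i - 1 := Nat.max_eq_left (by omega)
      have hmax0 : max (i - 1) 0 = i - 1 := Nat.max_eq_left (Nat.zero_le _)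
      rw [hmaxg, hmax0, pvB_groups, pvB_scan_close pages mp mt gs i hil hc]
      rw [if_neg (by omega)]
      have hi1 : i - 1 < pages.length := by omega
      have hstep1 : pvPrefAt pages i = pvPrefAt pages (i - 1) + pvTokA pages (i - 1) := by
        have := pvPrefAt_step pages (i - 1) hi1
        simpa [Nat.sub_add_cancel (by omega : 1 ≤ i)] using this
      rw [ih f (i + 1) (i - 1) _ _ (by omega) (by omega) (by omega)
        (by rw [pvPrefAt_step pages i hil, hstep1]; ring) (by omega)]
      simp
    · have hcA : ¬ ((gt + pvTokA pages i > mt ∨ (i : Int) - (gs : Int) ≥ mp) ∧ gs < i) := by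
        intro h
        apply hc
        rcases h.1 with h1 | h2
        · left; omega
        · right; exact h2
      rw [if_neg hcA]
      have hs := pvB_scan_step pages mp mt gs i hil hc
      have hbg : pvB_groups pages mp mt (f + 1) gs i =
          pvB_groups pages mp mt (f + 1) gs (i + 1) := by
        rw [pvB_groups, pvB_groups, hs]
      rw [hbg]
      exact ih (f + 1) (i + 1) gs (gt + pvTokA pages i) acc (by omega) (by omega) (by omega)
        (by rw [pvPrefAt_step pages i hil, hgt]; ring) (by omega)

-- ===== VERDICT =====
theorem build_page_groups_py_spec : Claim_equal_build_page_groups_py := by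
  intro pages mp mt _
  unfold Spec_build_page_groups_py build_page_groups_py build_page_groups_py_alt
  by_cases h : pages.length = 0
  · simp [h]
  · rw [if_neg h, if_neg h]
    -- step A's loop once past i = 0, where the guard `i > group_start` is false
    have h0 : 0 < pages.length := by omega
    rw [pvA_loop, dif_pos h0, if_neg (by simp)]
    have hpref0 : pvPrefAt pages 0 = 0 := by
      cases pages with
      | nil => simp at h
      | cons p rest => simp [pvPrefAt, pvPrefFrom]
    have hpref1 : pvPrefAt pages 1 = pvTokA pages 0 := by
      have := pvPrefAt_step pages 0 h0
      rw [hpref0] at this; simpa using this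
    rw [pvAB_key pages mp mt (pages.length - 1) (pages.length + 1) 1 0
      (0 + pvTokA pages 0) [] (by omega) (by omega) (by omega)
      (by rw [hpref0, hpref1]; ring) (by omega)]
    simp
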